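-- pv_equiv track=rewrite | github.com/piachouaifaty/GenDLN | baselines/opro/opro_prompting.py | divide_json_into_subsets
-- ===== SOURCE A (Python) =====
-- def divide_json_into_subsets(input_json, num_subsets=10):
--     """
--     Divides a JSON object into a specified number of subsets.
--
--     :param input_json: The JSON object to divide.
--     :param num_subsets: The number of subsets to divide the JSON into.
--     :return: A list of dictionaries, each containing a subset of the input JSON.
--     """
--     # Convert the JSON object into a list of key-value pairs
--     items = list(input_json.items())
--
--     # Calculate the chunk size for each subset
--     chunk_size = max(1, (len(items) // num_subsets))
--
--     # Divide the items into subsets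
--     subsets = [
--         dict(items[i:i + chunk_size])
--         for i in range(0, len(items), chunk_size)
--     ]
--
--     return subsets
-- ===== SOURCE B (Python) =====
-- def divide_json_into_subsets(input_json, num_subsets=10):
--     """
--     Divides a JSON object into a specified number of subsets.
--
--     Single pass over the items with a running bucket instead of slicing.
--     """
--     chunk_size = max(1, len(input_json) // num_subsets)
--     subsets = []
--     bucket = []
--     for pair in input_json.items():
--         bucket.append(pair)
--         if len(bucket) == chunk_size:
--             subsets.append(dict(bucket))
--             bucket = []
--     if bucket:
--         subsets.append(dict(bucket))
--     return subsets
-- ===== Notes on version B (the rewrite author's own statement) =====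
-- stated objective: alternative
-- what changed: Replaces the range/slice comprehension (index arithmetic plus repeated slicing) by a single pass over the items that accumulates a running bucket and flushes it into the result each time it reaches chunk_size, emitting the trailing partial bucket only if non-empty.
import Mathlib
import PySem

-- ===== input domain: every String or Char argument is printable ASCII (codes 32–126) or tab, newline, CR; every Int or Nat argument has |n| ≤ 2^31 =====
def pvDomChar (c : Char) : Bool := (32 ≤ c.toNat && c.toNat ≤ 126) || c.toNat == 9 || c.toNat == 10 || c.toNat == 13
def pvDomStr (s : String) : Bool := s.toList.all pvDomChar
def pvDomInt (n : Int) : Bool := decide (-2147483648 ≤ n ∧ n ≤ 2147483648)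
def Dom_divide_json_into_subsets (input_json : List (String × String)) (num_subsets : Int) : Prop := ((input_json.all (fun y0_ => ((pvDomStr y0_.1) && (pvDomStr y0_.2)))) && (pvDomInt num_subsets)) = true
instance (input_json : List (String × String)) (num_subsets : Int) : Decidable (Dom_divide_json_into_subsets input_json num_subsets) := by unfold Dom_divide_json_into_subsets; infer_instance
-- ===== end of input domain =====

-- B replaces A's range/slice comprehension by one pass with a running bucket flushed at chunk_size (alternative decomposition, same cost).

-- ===== PORT A =====
-- dict(pairs): build a PySem.Dict from the pairs and return its item list (both Pythons call dict() this way)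
def pvToDict (ps : List (String × String)) : List (String × String) :=
  (PySem.Dict.ofList ps).items

def divide_json_into_subsets (input_json : List (String × String)) (num_subsets : Int) : List (List (String × String)) :=
  let items := input_json
  let chunk_size : Int := max 1 (PySem.Int.floordiv (items.length : Int) num_subsets)
  (PySem.List.pyRange 0 (items.length : Int) chunk_size).map
    (fun i => pvToDict (PySem.List.slice items (some i) (some (i + chunk_size))))

-- ===== PORT B =====
def pvBucketStep (chunk_size : Int)
    (st : List (List (String × String)) × List (String × String)) (p : String × String) :
    List (List (String × String)) × List (String × String) :=
  let bucket' := st.2 ++ [p]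
  if (bucket'.length : Int) = chunk_size then (st.1 ++ [pvToDict bucket'], []) else (st.1, bucket')

def pvFinish (st : List (List (String × String)) × List (String × String)) :
    List (List (String × String)) :=
  if st.2 ≠ [] then st.1 ++ [pvToDict st.2] else st.1

def divide_json_into_subsets_alt (input_json : List (String × String)) (num_subsets : Int) : List (List (String × String)) :=
  let chunk_size : Int := max 1 (PySem.Int.floordiv (input_json.length : Int) num_subsets)
  pvFinish (input_json.foldl (pvBucketStep chunk_size) ([], []))

-- ===== PRECONDITION & SPEC =====
-- Python raises ZeroDivisionError at `len(items) // num_subsets` iff num_subsets == 0.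
def Pre_divide_json_into_subsets (input_json : List (String × String)) (num_subsets : Int) : Prop := num_subsets ≠ 0
instance (input_json : List (String × String)) (num_subsets : Int) : Decidable (Pre_divide_json_into_subsets input_json num_subsets) := by unfold Pre_divide_json_into_subsets; infer_instance
def pvWitness_divide_json_into_subsets : (List (String × String)) × Int := ([("a", "1"), ("b", "2"), ("c", "3")], 2)

def Spec_divide_json_into_subsets (input_json : List (String × String)) (num_subsets : Int) (out : List (List (String × String))) : Prop := out = divide_json_into_subsets_alt input_json num_subsets
instance (input_json : List (String × String)) (num_subsets : Int) (out : List (List (String × String))) : Decidable (Spec_divide_json_into_subsets input_json num_subsets out) := by unfold Spec_divide_json_into_subsets; infer_instance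

-- ===== CLAIM (what is proved, stated in full; the proofs are below) =====
def Claim_equal_divide_json_into_subsets : Prop := ∀ (input_json : List (String × String)) (num_subsets : Int), Dom_divide_json_into_subsets input_json num_subsets → Pre_divide_json_into_subsets input_json num_subsets → Spec_divide_json_into_subsets input_json num_subsets (divide_json_into_subsets input_json num_subsets)

-- ===== LEMMAS AND PROOFS =====

-- common description of both programs: the list cut into chunks of n (n ≥ 1), last chunk possibly short
def pvChunks (n : Nat) : List (String × String) → List (List (String × String))
  | [] => []
  | x :: xs => (x :: xs.take (n - 1)) :: pvChunks n (xs.drop (n - 1))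
termination_by xs => xs.length
decreasing_by simp

lemma pvChunks_nil (n : Nat) : pvChunks n [] = [] := by
  rw [pvChunks.eq_def]

lemma pvChunks_cons_eq (n : Nat) (x : String × String) (xs : List (String × String)) :
    pvChunks n (x :: xs) = (x :: xs.take (n - 1)) :: pvChunks n (xs.drop (n - 1)) := by
  rw [pvChunks.eq_def]

lemma pvChunks_cons (n : Nat) (hn : 1 ≤ n) (xs : List (String × String)) (hxs : xs ≠ []) :
    pvChunks n xs = xs.take n :: pvChunks n (xs.drop n) := by
  cases xs with
  | nil => exact absurd rfl hxs
  | cons x t =>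
    obtain ⟨m, rfl⟩ : ∃ m, n = m + 1 := ⟨n - 1, by omega⟩
    rw [pvChunks_cons_eq]
    simp

lemma pvRange_pos_cons (a b s : Int) (hs : 0 < s) (h : a < b) :
    PySem.List.pyRange a b s = a :: PySem.List.pyRange (a + s) b s := by
  rw [PySem.List.pyRange_of_pos _ _ hs, PySem.List.pyRange_of_pos _ _ hs]
  have key : ((b - a + s - 1) / s).toNat = (if a + s < b then ((b - (a + s) + s - 1) / s).toNat else 0) + 1 := by
    have h1 : b - a + s - 1 = (b - a - 1) + 1 * s := by ring
    have h2 : (b - a + s - 1) / s = (b - a - 1) / s + 1 := by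
      rw [h1, Int.add_mul_ediv_right _ _ (by omega : s ≠ 0)]
    by_cases hb : a + s < b
    · have h3 : b - (a + s) + s - 1 = b - a - 1 := by ring
      rw [if_pos hb, h3, h2]
      have : 0 ≤ (b - a - 1) / s := Int.ediv_nonneg (by omega) (by omega)
      omega
    · have h4 : (b - a - 1) / s = 0 := Int.ediv_eq_zero_of_lt (by omega) (by omega)
      rw [if_neg hb, h2, h4]; rfl
  rw [if_pos h, key, List.range_succ_eq_map, List.map_cons, List.map_map]
  refine congrArg₂ List.cons (by simp) ?_
  apply List.map_congr_left
  intro k _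
  show a + s * ((k + 1 : Nat) : Int) = a + s + s * (k : Int)
  push_cast
  ring

lemma pvChunks_slices (c : Int) (hc : 1 ≤ c) (xs : List (String × String)) :
    ∀ (m a : Nat), xs.length - a ≤ m →
      (PySem.List.pyRange (a : Int) (xs.length : Int) c).map
          (fun i => PySem.List.slice xs (some i) (some (i + c)))
        = pvChunks c.toNat (xs.drop a) := by
  intro m
  induction m with
  | zero =>
    intro a ha
    have hge : xs.length ≤ a := by omega
    rw [PySem.List.pyRange_of_pos _ _ (by omega : (0:Int) < c)]
    rw [if_neg (by exact_mod_cast Nat.not_lt.mpr hge)]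
    simp [List.drop_of_length_le hge, pvChunks_nil]
  | succ m ih =>
    intro a ha
    by_cases hlt : a < xs.length
    · have hcc : ((c.toNat : Int)) = c := Int.toNat_of_nonneg (by omega)
      rw [pvRange_pos_cons _ _ _ (by omega) (by exact_mod_cast hlt)]
      rw [List.map_cons]
      have hslice : PySem.List.slice xs (some (a : Int)) (some ((a : Int) + c))
          = (xs.drop a).take c.toNat := by
        rw [PySem.List.slice_toNat xs (Int.natCast_nonneg a)
              (by have := Int.natCast_nonneg a; omega)]
        congr 1
        all_goals omega
      have hcast : (a : Int) + c = ((a + c.toNat : Nat) : Int) := by push_cast [hcc]; ring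
      rw [hslice, hcast, ih (a + c.toNat) (by omega)]
      rw [pvChunks_cons c.toNat (by omega) (xs.drop a)
            (by simp [List.drop_eq_nil_iff]; omega)]
      have hdd : xs.drop (a + c.toNat) = (xs.drop a).drop c.toNat := by
        rw [List.drop_drop]
      rw [hdd]
    · rw [PySem.List.pyRange_of_pos _ _ (by omega : (0:Int) < c)]
      rw [if_neg (by exact_mod_cast hlt)]
      simp [List.drop_of_length_le (by omega : xs.length ≤ a), pvChunks_nil]

lemma pvFold_chunks (c : Int) (hc : 1 ≤ c) :
    ∀ (xs : List (String × String)) (acc : List (List (String × String)))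
      (b : List (String × String)), (b.length : Int) < c →
      pvFinish (xs.foldl (pvBucketStep c) (acc, b))
        = acc ++ (pvChunks c.toNat (b ++ xs)).map pvToDict := by
  intro xs
  induction xs with
  | nil =>
    intro acc b hb
    cases b with
    | nil => simp [pvFinish, pvChunks_nil]
    | cons y t =>
      have hb' : (t.length : Int) + 1 < c := by
        have := hb
        simp only [List.length_cons] at this
        push_cast at this
        omega
      have ht : t.length ≤ c.toNat - 1 := by omega
      rw [List.append_nil, pvChunks_cons_eq]
      simp [pvFinish, List.take_of_length_le ht, List.drop_eq_nil_iff.mpr ht, pvChunks_nil]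
  | cons p xs ih =>
    intro acc b hb
    rw [List.foldl_cons]
    show pvFinish (xs.foldl (pvBucketStep c) (pvBucketStep c (acc, b) p)) = _
    rw [pvBucketStep]
    by_cases hfull : (((b ++ [p]).length : Int)) = c
    · rw [if_pos hfull]
      rw [ih (acc ++ [pvToDict (b ++ [p])]) [] (by simpa using hc)]
      have hlen : (b ++ [p]).length = c.toNat := by omega
      have hne : (b ++ [p]) ++ xs ≠ [] := by
        intro h
        simpa using congrArg List.length h
      have htake : ((b ++ [p]) ++ xs).take c.toNat = b ++ [p] := by
        rw [← hlen, List.take_left]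
      have hdrop : ((b ++ [p]) ++ xs).drop c.toNat = xs := by
        rw [← hlen, List.drop_left]
      have hsplit : b ++ p :: xs = (b ++ [p]) ++ xs := by simp
      rw [hsplit, pvChunks_cons c.toNat (by omega) _ hne, htake, hdrop]
      simp
    · rw [if_neg hfull]
      have hlt : ((b ++ [p]).length : Int) < c := by
        simp only [List.length_append, List.length_cons, List.length_nil] at hfull ⊢
        push_cast at hfull ⊢
        omega
      rw [ih acc (b ++ [p]) hlt]
      simp

-- ===== VERDICT (by name: the statement is the Claim_ definition above) =====
theorem divide_json_into_subsets_spec : Claim_equal_divide_json_into_subsets := by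
  intro input_json num_subsets _ _
  unfold Spec_divide_json_into_subsets
  unfold divide_json_into_subsets divide_json_into_subsets_alt
  set c : Int := max 1 (PySem.Int.floordiv (input_json.length : Int) num_subsets) with hc
  have hc1 : 1 ≤ c := le_max_left _ _
  have hA : (PySem.List.pyRange 0 (input_json.length : Int) c).map
      (fun i => pvToDict (PySem.List.slice input_json (some i) (some (i + c))))
      = (pvChunks c.toNat input_json).map pvToDict := by
    have := pvChunks_slices c hc1 input_json input_json.length 0 (by omega)
    simp only [Nat.cast_zero, List.drop_zero] at this
    rw [← this, List.map_map]
    rfl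
  have hB : pvFinish (input_json.foldl (pvBucketStep c) ([], []))
      = (pvChunks c.toNat input_json).map pvToDict := by
    have := pvFold_chunks c hc1 input_json [] [] (by simpa using hc1)
    simpa using this
  rw [hA, hB]
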